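-- pv_equiv track=rewrite | github.com/O-paque/CS-320 | Testing/bloom.py | m_hash
-- ===== SOURCE A (Python) =====
-- BLOOMSIZE = 32  # bits = 4 octets
--
-- PRIME1 = 37
--
-- PRIME2 = 101
--
-- def m_hash(k, i):
--     assert (k is not None)
--     b_str = k.encode()
--     b_val = 0
--     for j in range(0, len(b_str)):
--         b_val = ((b_val * 256) + b_str[j])
--
--     p1 = b_val % PRIME1
--     p2 = i * (b_val % PRIME2)
--     return ((p1 + p2) % BLOOMSIZE)
-- ===== SOURCE B (Python) =====
-- BLOOMSIZE = 32
-- PRIME1 = 37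
-- PRIME2 = 101
--
-- def m_hash(k, i):
--     # Horner's rule with modular reduction: keep residues mod PRIME1/PRIME2
--     # incrementally instead of building a huge base-256 integer.
--     r1 = 0
--     r2 = 0
--     for b in k.encode():
--         r1 = (r1 * 256 + b) % PRIME1
--         r2 = (r2 * 256 + b) % PRIME2
--     return (r1 + i * r2) % BLOOMSIZE
-- ===== Notes on version B (the rewrite author's own statement) =====
-- stated objective: faster
-- what changed: Replace building the full base-256 bignum and taking mods at the end with Horner's rule keeping the residues mod PRIME1 and PRIME2 incrementally, so all arithmetic stays on small integers.
import Mathlib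
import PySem

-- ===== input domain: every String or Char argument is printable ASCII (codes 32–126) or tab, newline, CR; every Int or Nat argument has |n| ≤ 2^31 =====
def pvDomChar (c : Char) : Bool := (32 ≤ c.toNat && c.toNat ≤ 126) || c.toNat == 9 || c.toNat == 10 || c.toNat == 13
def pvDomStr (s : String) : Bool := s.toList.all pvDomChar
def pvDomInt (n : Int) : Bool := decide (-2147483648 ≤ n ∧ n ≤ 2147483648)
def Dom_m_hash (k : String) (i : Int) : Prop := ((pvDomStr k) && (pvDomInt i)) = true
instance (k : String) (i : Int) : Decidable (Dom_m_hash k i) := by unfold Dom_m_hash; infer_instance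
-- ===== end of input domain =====

-- B replaces A's end-of-loop bignum mods with incremental Horner-mod residues (faster, O(n) small-int arithmetic).
-- ===== PORT A =====
-- k.encode(): on the printable-ASCII/tab/newline/CR domain, UTF-8 bytes = char codes (exact on Dom).
def m_hash (k : String) (i : Int) : Int :=
  let b_val := k.toList.foldl (fun a c => a * 256 + (c.toNat : Int)) 0
  let p1 := PySem.Int.mod b_val 37
  let p2 := i * PySem.Int.mod b_val 101
  PySem.Int.mod (p1 + p2) 32

-- ===== PORT B =====
def m_hash_alt (k : String) (i : Int) : Int :=
  let r := k.toList.foldl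
    (fun (r : Int × Int) c =>
      (PySem.Int.mod (r.1 * 256 + (c.toNat : Int)) 37,
       PySem.Int.mod (r.2 * 256 + (c.toNat : Int)) 101)) (0, 0)
  PySem.Int.mod (r.1 + i * r.2) 32

-- ===== PRECONDITION & SPEC =====
def Spec_m_hash (k : String) (i : Int) (out : Int) : Prop := out = m_hash_alt k i
instance (k : String) (i : Int) (out : Int) : Decidable (Spec_m_hash k i out) := by unfold Spec_m_hash; infer_instance

-- ===== CLAIM (what is proved, stated in full; the proofs are below) =====
def Claim_equal_m_hash : Prop := ∀ (k : String) (i : Int), Dom_m_hash k i → Spec_m_hash k i (m_hash k i)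

-- ===== LEMMAS AND PROOFS =====

-- ===== VERDICT (by name: the statement is the Claim_ definition above) =====
-- B's fold from a nonzero seed equals the fold from 0 plus the seed shifted by 256^length.
theorem foldl_shift (t : List Char) (b : Int) :
    t.foldl (fun a c => a * 256 + (c.toNat : Int)) b
    = t.foldl (fun a c => a * 256 + (c.toNat : Int)) 0 + b * 256 ^ t.length := by
  induction t generalizing b with
  | nil => simp
  | cons c t ih =>
    simp only [List.foldl_cons, List.length_cons]
    rw [ih (b * 256 + (c.toNat : Int)), ih ((0:Int) * 256 + (c.toNat : Int))]
    ring

-- Loop invariant: B's pair of residues is A's accumulator taken mod 37 and mod 101.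
theorem hash_fold_inv (l : List Char) (a : Int) :
    l.foldl (fun (r : Int × Int) c =>
      (PySem.Int.mod (r.1 * 256 + (c.toNat : Int)) 37,
       PySem.Int.mod (r.2 * 256 + (c.toNat : Int)) 101)) (a % 37, a % 101)
    = ((l.foldl (fun a c => a * 256 + (c.toNat : Int)) 0 + a * 256 ^ l.length) % 37,
       (l.foldl (fun a c => a * 256 + (c.toNat : Int)) 0 + a * 256 ^ l.length) % 101) := by
  induction l generalizing a with
  | nil => simp
  | cons c t ih =>
    simp only [List.foldl_cons, List.length_cons]
    rw [PySem.Int.mod_eq_emod_of_pos (a := a % 37 * 256 + (c.toNat : Int)) (by norm_num),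
        PySem.Int.mod_eq_emod_of_pos (a := a % 101 * 256 + (c.toNat : Int)) (by norm_num)]
    have h37 : (a % 37 * 256 + (c.toNat : Int)) % 37 = (a * 256 + (c.toNat : Int)) % 37 := by
      omega
    have h101 : (a % 101 * 256 + (c.toNat : Int)) % 101 = (a * 256 + (c.toNat : Int)) % 101 := by
      omega
    rw [h37, h101, ih]
    rw [foldl_shift t ((0:Int) * 256 + (c.toNat : Int))]
    congr 2 <;> ring

theorem m_hash_spec : Claim_equal_m_hash := by
  intro k i _
  show m_hash k i = m_hash_alt k i
  unfold m_hash m_hash_alt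
  have h := hash_fold_inv k.toList 0
  simp only [Int.zero_emod, zero_mul, add_zero] at h
  simp only [PySem.Int.mod_eq_emod_of_pos (b := (37:Int)) (by norm_num),
    PySem.Int.mod_eq_emod_of_pos (b := (101:Int)) (by norm_num)] at h ⊢
  rw [h]
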